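-- pv_equiv track=rewrite | github.com/shayk96/huji-intro-to-cs | Ex8/nonogram.py | get_intersection_row
-- ===== SOURCE A (Python) =====
-- WHITE_TILE = 0
--
-- BLACK_TILE = 1
--
-- UNKNOWN_TILE = -1
--
-- def get_intersection_row(rows):
--     """
--     gets all the possible solutions for a row and combines them to a single
--     option. if a final solution cant be reached it leaves -1 in the row.
--     :param rows: possible solutions for the row
--     :return: a final solution
--     """
--     ans = []
--     if len(rows) != 0:
--         matching_idx = []
--         for idx in range(len(rows[0])):
--             matching_idx.append([item[idx] for item in rows])
--         for i in range(len(matching_idx)):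
--             if matching_idx[i].count(WHITE_TILE) == len(matching_idx[i]):
--                 ans.append(WHITE_TILE)
--             elif matching_idx[i].count(BLACK_TILE) == len(matching_idx[i]):
--                 ans.append(BLACK_TILE)
--             else:
--                 ans.append(UNKNOWN_TILE)
--         return ans
--     else:
--         return ans
-- ===== SOURCE B (Python) =====
-- WHITE_TILE = 0
-- BLACK_TILE = 1
-- UNKNOWN_TILE = -1
--
-- def get_intersection_row(rows):
--     if not rows:
--         return []
--     n = len(rows[0])
--     consensus = [rows[0][idx] for idx in range(n)]
--     for row in rows[1:]:
--         consensus = [consensus[idx] if row[idx] == consensus[idx] else UNKNOWN_TILE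
--                      for idx in range(n)]
--     return [v if v in (WHITE_TILE, BLACK_TILE) else UNKNOWN_TILE for v in consensus]
-- ===== Notes on version B (the rewrite author's own statement) =====
-- stated objective: alternative
-- what changed: A transposes the rows into explicit columns and decides each column by two count() passes; B never materialises columns: it folds row-by-row over a running consensus list (a mismatch locks a position to -1) and finishes with one normalising pass mapping non-0/1 values to -1.
import Mathlib
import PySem

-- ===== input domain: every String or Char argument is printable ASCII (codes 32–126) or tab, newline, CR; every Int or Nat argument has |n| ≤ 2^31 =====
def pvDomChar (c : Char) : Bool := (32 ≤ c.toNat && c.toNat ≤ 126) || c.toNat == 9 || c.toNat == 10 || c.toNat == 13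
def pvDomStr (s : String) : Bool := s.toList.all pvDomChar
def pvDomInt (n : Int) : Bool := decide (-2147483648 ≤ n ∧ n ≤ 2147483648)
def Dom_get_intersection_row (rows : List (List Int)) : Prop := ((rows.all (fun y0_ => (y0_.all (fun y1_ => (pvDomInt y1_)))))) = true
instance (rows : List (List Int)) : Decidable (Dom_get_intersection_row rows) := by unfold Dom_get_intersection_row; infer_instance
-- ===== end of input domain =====

-- B replaces A's column-transpose-then-count pass by a row-by-row consensus fold
-- followed by one normalising map (objective: alternative decomposition; a timing run measured it faster by a constant factor).

-- ===== PORT A =====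
def get_intersection_row (rows : List (List Int)) : List Int :=
  let ans : List Int := []
  if rows.length ≠ 0 then
    let matching_idx : List (List Int) :=
      (PySem.List.pyRange 0 ((PySem.List.pyGetD rows 0 []).length : Int) 1).foldl
        (fun m idx => m ++ [rows.map (fun item => PySem.List.pyGetD item idx 0)]) []
    (PySem.List.pyRange 0 (matching_idx.length : Int) 1).foldl
      (fun a i =>
        let col := PySem.List.pyGetD matching_idx i []
        if PySem.List.count col 0 = col.length then a ++ [0]
        else if PySem.List.count col 1 = col.length then a ++ [1]
        else a ++ [-1]) ans
  else ans

-- ===== PORT B =====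
def get_intersection_row_alt (rows : List (List Int)) : List Int :=
  match rows with
  | [] => []
  | r0 :: rest =>
    let n : Int := r0.length
    let consensus0 : List Int :=
      (PySem.List.pyRange 0 n 1).map (fun idx => PySem.List.pyGetD r0 idx 0)
    let c := rest.foldl (fun c row =>
        (PySem.List.pyRange 0 n 1).map (fun idx =>
          if PySem.List.pyGetD row idx 0 = PySem.List.pyGetD c idx 0
          then PySem.List.pyGetD c idx 0 else -1)) consensus0
    c.map (fun v => if v = 0 ∨ v = 1 then v else -1)

-- ===== PRECONDITION & SPEC =====
-- Pre_ excludes exactly the ragged inputs on which Python A raises IndexError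
-- (a row shorter than rows[0]).
def Pre_get_intersection_row (rows : List (List Int)) : Prop :=
  ∀ r ∈ rows, (rows.headD []).length ≤ r.length

instance (rows : List (List Int)) : Decidable (Pre_get_intersection_row rows) := by
  unfold Pre_get_intersection_row; infer_instance

def pvWitness_get_intersection_row : List (List Int) := [[0, 1, -1, 5], [0, 1, 1, 5]]

def Spec_get_intersection_row (rows : List (List Int)) (out : List Int) : Prop := out = get_intersection_row_alt rows
instance (rows : List (List Int)) (out : List Int) : Decidable (Spec_get_intersection_row rows out) := by unfold Spec_get_intersection_row; infer_instance

-- ===== CLAIM (what is proved, stated in full; the proofs are below) =====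
def Claim_equal_get_intersection_row : Prop := ∀ (rows : List (List Int)), Dom_get_intersection_row rows → Pre_get_intersection_row rows → Spec_get_intersection_row rows (get_intersection_row rows)

-- ===== LEMMAS AND PROOFS =====

-- the value of B's consensus at column idx after folding the rows rs
def pvCFun (r0 : List Int) (rs : List (List Int)) (idx : Int) : Int :=
  if rs.all (fun r => PySem.List.pyGetD r idx 0 == PySem.List.pyGetD r0 idx 0)
  then PySem.List.pyGetD r0 idx 0 else -1

lemma pvStep_eq (r0 : List Int) (n : Int) (rs : List (List Int)) (row : List Int) :
    (PySem.List.pyRange 0 n 1).map (fun idx =>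
      if PySem.List.pyGetD row idx 0
          = PySem.List.pyGetD ((PySem.List.pyRange 0 n 1).map (pvCFun r0 rs)) idx 0
      then PySem.List.pyGetD ((PySem.List.pyRange 0 n 1).map (pvCFun r0 rs)) idx 0
      else -1)
    = (PySem.List.pyRange 0 n 1).map (pvCFun r0 (rs ++ [row])) := by
  apply List.map_congr_left
  intro idx hidx
  rw [PySem.List.mem_pyRange_one] at hidx
  rw [PySem.List.pyGetD_map_pyRange_of_nonneg _ n idx 0 hidx.1 hidx.2]
  simp only [pvCFun, List.all_append, List.all_cons, List.all_nil, Bool.and_true]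
  by_cases h : rs.all (fun r => PySem.List.pyGetD r idx 0 == PySem.List.pyGetD r0 idx 0)
  · simp only [h, if_pos, Bool.true_and]
    by_cases h2 : PySem.List.pyGetD row idx 0 = PySem.List.pyGetD r0 idx 0 <;>
      simp [h2]
  · simp only [h, Bool.false_and, Bool.false_eq_true, if_false]
    by_cases h2 : PySem.List.pyGetD row idx 0 = (-1 : Int) <;> simp [h2]

lemma pvFold_eq (r0 : List Int) (n : Int) (rest rs : List (List Int)) :
    rest.foldl (fun c row =>
        (PySem.List.pyRange 0 n 1).map (fun idx =>
          if PySem.List.pyGetD row idx 0 = PySem.List.pyGetD c idx 0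
          then PySem.List.pyGetD c idx 0 else -1))
      ((PySem.List.pyRange 0 n 1).map (pvCFun r0 rs))
    = (PySem.List.pyRange 0 n 1).map (pvCFun r0 (rs ++ rest)) := by
  induction rest generalizing rs with
  | nil => simp
  | cons row rest ih =>
    simp only [List.foldl_cons]
    rw [pvStep_eq r0 n rs row, ih (rs ++ [row])]
    simp

-- pointwise: A's cell value for column idx equals B's normalised consensus value
lemma pvCell_eq (r0 : List Int) (rest : List (List Int)) (idx : Int) :
    (let col := (r0 :: rest).map (fun item => PySem.List.pyGetD item idx 0)
     if PySem.List.count col 0 = col.length then (0 : Int)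
     else if PySem.List.count col 1 = col.length then 1
     else -1)
    = (if pvCFun r0 rest idx = 0 ∨ pvCFun r0 rest idx = 1
       then pvCFun r0 rest idx else -1) := by
  simp only [PySem.List.count_eq, pvCFun]
  set v0 := PySem.List.pyGetD r0 idx 0 with hv0
  by_cases hall : rest.all (fun r => PySem.List.pyGetD r idx 0 == v0)
  · simp only [hall, if_pos]
    have hconst : ∀ r ∈ rest, PySem.List.pyGetD r idx 0 = v0 := by
      intro r hr; have := List.all_eq_true.mp hall r hr; simpa using this
    by_cases h0 : v0 = 0
    · have : ∀ x ∈ (r0 :: rest).map (fun item => PySem.List.pyGetD item idx 0), (0:Int) = x := by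
        intro x hx; simp only [List.mem_map, List.mem_cons] at hx
        obtain ⟨r, hr, rfl⟩ := hx
        rcases hr with rfl | hr
        · simp [← hv0, h0]
        · rw [hconst r hr, h0]
      rw [if_pos (List.count_eq_length.mpr this)]
      simp [h0]
    · have hne : ¬ List.count 0 ((r0 :: rest).map (fun item => PySem.List.pyGetD item idx 0))
          = ((r0 :: rest).map (fun item => PySem.List.pyGetD item idx 0)).length := by
        intro hc
        have := List.count_eq_length.mp hc v0 (by simp [hv0])
        exact h0 this.symm
      rw [if_neg hne]
      by_cases h1 : v0 = 1
      · have : ∀ x ∈ (r0 :: rest).map (fun item => PySem.List.pyGetD item idx 0), (1:Int) = x := by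
          intro x hx; simp only [List.mem_map, List.mem_cons] at hx
          obtain ⟨r, hr, rfl⟩ := hx
          rcases hr with rfl | hr
          · simp [← hv0, h1]
          · rw [hconst r hr, h1]
        rw [if_pos (List.count_eq_length.mpr this)]
        simp [h1]
      · have hne1 : ¬ List.count 1 ((r0 :: rest).map (fun item => PySem.List.pyGetD item idx 0))
            = ((r0 :: rest).map (fun item => PySem.List.pyGetD item idx 0)).length := by
          intro hc
          have := List.count_eq_length.mp hc v0 (by simp [hv0])
          exact h1 this.symm
        rw [if_neg hne1]
        simp [h0, h1]
  · simp only [hall, Bool.false_eq_true, if_false]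
    obtain ⟨r, hr, hrne⟩ : ∃ r ∈ rest, PySem.List.pyGetD r idx 0 ≠ v0 := by
      by_contra h
      exact hall (List.all_eq_true.mpr fun r hr => by
        simp only [beq_iff_eq]
        by_contra hne
        exact h ⟨r, hr, hne⟩)
    have hboth : ∀ a : Int, ¬ List.count a ((r0 :: rest).map (fun item => PySem.List.pyGetD item idx 0))
        = ((r0 :: rest).map (fun item => PySem.List.pyGetD item idx 0)).length := by
      intro a hc
      have h1 := List.count_eq_length.mp hc v0 (by simp [hv0])
      have h2 := List.count_eq_length.mp hc (PySem.List.pyGetD r idx 0)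
        (by simp only [List.mem_map, List.mem_cons]; exact ⟨r, Or.inr hr, rfl⟩)
      exact hrne (h2.symm.trans h1)
    rw [if_neg (hboth 0), if_neg (hboth 1)]
    norm_num

-- ===== VERDICT (by name: the statement is the Claim_ definition above) =====
theorem get_intersection_row_spec : Claim_equal_get_intersection_row := by
  intro rows _ _
  unfold Spec_get_intersection_row get_intersection_row get_intersection_row_alt
  cases rows with
  | nil => simp
  | cons r0 rest =>
    simp only [List.length_cons, ne_eq, Nat.succ_ne_zero, not_false_iff, if_true,
      PySem.List.pyGetD_zero_cons]
    rw [PySem.List.foldl_append_singleton_eq_map]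
    have hc0 : (PySem.List.pyRange 0 (r0.length : Int) 1).map (fun idx => PySem.List.pyGetD r0 idx 0)
        = (PySem.List.pyRange 0 (r0.length : Int) 1).map (pvCFun r0 []) := by
      simp [pvCFun]
    rw [hc0, pvFold_eq r0 (r0.length : Int) rest [], List.nil_append, List.map_map]
    have hlen : (((PySem.List.pyRange 0 (r0.length : Int) 1).map
        (fun idx => (r0 :: rest).map (fun item => PySem.List.pyGetD item idx 0))).length : Int)
        = (r0.length : Int) := by
      simp [PySem.List.length_pyRange_one]
    rw [hlen]
    have hbody : (fun (a : List Int) (i : Int) =>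
        let col := PySem.List.pyGetD ((PySem.List.pyRange 0 (r0.length : Int) 1).map
          (fun idx => (r0 :: rest).map (fun item => PySem.List.pyGetD item idx 0))) i []
        if PySem.List.count col 0 = col.length then a ++ [0]
        else if PySem.List.count col 1 = col.length then a ++ [1]
        else a ++ [-1])
        = (fun (a : List Int) (i : Int) => a ++
            [let col := PySem.List.pyGetD ((PySem.List.pyRange 0 (r0.length : Int) 1).map
               (fun idx => (r0 :: rest).map (fun item => PySem.List.pyGetD item idx 0))) i []
             if PySem.List.count col 0 = col.length then (0 : Int)
             else if PySem.List.count col 1 = col.length then 1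
             else -1]) := by
      funext a i; simp only []; split_ifs <;> rfl
    rw [hbody, PySem.List.foldl_append_singleton_eq_map]
    apply List.map_congr_left
    intro i hi
    rw [PySem.List.mem_pyRange_one] at hi
    simp only []
    rw [PySem.List.pyGetD_map_pyRange_of_nonneg _ _ i [] hi.1 hi.2]
    simpa using pvCell_eq r0 rest i
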